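-- pv_equiv track=rewrite | github.com/Schaechtle/VentIPyN | SPs/dag.py | mat2bin
-- ===== SOURCE A (Python) =====
-- def mat2bin(dag):
--     binRepresentation='0b'
--     start=False
--     for i in range(len(dag)):
--         for j in range(len(dag)):
--             if dag[i][j]:
--                 binRepresentation+='1'
--                 start=True
--             else:
--                 if start:
--                     binRepresentation+='0'
--     if start:
--         return binRepresentation
--     return '0b0'
-- ===== SOURCE B (Python) =====
-- def mat2bin(dag):
--     n = len(dag)
--     acc = 0
--     for row in range(n):
--         for col in range(n):
--             acc = acc * 2 + (1 if dag[row][col] else 0)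
--     return bin(acc)
-- ===== Notes on version B (the rewrite author's own statement) =====
-- stated objective: alternative
-- what changed: Instead of building the binary string character by character with a start-flag that skips leading zeros, B Horner-accumulates the row-major bits into one Python integer and returns bin(acc): the numeric representation strips leading zeros and yields '0b0' for zero by itself.
import Mathlib
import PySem

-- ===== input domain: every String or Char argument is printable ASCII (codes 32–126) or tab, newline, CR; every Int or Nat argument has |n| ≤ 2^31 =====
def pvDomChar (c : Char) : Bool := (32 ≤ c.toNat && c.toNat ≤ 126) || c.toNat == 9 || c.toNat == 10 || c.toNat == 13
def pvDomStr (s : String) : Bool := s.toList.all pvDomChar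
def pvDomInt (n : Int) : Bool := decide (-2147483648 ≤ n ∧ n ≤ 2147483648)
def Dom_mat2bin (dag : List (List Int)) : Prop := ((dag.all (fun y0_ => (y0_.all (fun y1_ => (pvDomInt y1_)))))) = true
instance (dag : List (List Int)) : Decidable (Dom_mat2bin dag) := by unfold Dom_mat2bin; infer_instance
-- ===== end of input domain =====

-- B Horner-accumulates the row-major bits into one integer and formats it with bin();
-- objective: alternative (arithmetic accumulation instead of string building with a flag).

-- ===== PORT A =====
-- strings built by '+=' are ported as List Char accumulators (exact: Python str concat).
-- dag[i][j] raises IndexError on rows shorter than len(dag); Pre_ excludes that, so the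
-- pyGetD defaults are never taken on admitted inputs.
def mat2bin (dag : List (List Int)) : String :=
  let n : Int := dag.length
  let r := (PySem.List.pyRange 0 n 1).foldl (fun (acc : List Char × Bool) i =>
      (PySem.List.pyRange 0 n 1).foldl (fun (acc : List Char × Bool) j =>
        if PySem.List.pyGetD (PySem.List.pyGetD dag i []) j 0 ≠ 0 then
          (acc.1 ++ ['1'], true)
        else if acc.2 then (acc.1 ++ ['0'], acc.2) else acc) acc)
    (['0','b'], false)
  if r.2 then String.ofList r.1 else "0b0"

-- ===== PORT B =====
-- binary digits of a Nat, most significant first ([] for 0); hand port, exact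
def pvBinChars (n : Nat) : List Char :=
  if h : n = 0 then [] else pvBinChars (n / 2) ++ [if n % 2 == 1 then '1' else '0']
decreasing_by exact Nat.div_lt_self (Nat.pos_of_ne_zero h) one_lt_two

-- hand port of Python's bin(): exact for every int (negative → '-0b…', zero → '0b0')
def pvPyBin (n : Int) : String :=
  if n < 0 then String.ofList ('-' :: '0' :: 'b' :: pvBinChars (-n).toNat)
  else if n = 0 then "0b0"
  else String.ofList ('0' :: 'b' :: pvBinChars n.toNat)

def mat2bin_alt (dag : List (List Int)) : String :=
  let n : Int := dag.length
  let acc : Int := (PySem.List.pyRange 0 n 1).foldl (fun (acc : Int) row =>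
      (PySem.List.pyRange 0 n 1).foldl (fun (acc : Int) col =>
        acc * 2 + (if PySem.List.pyGetD (PySem.List.pyGetD dag row []) col 0 ≠ 0 then 1 else 0)) acc) 0
  pvPyBin acc

-- ===== PRECONDITION & SPEC =====
-- A indexes dag[i][j] for j < len(dag): it raises IndexError when some row is shorter
-- than len(dag); exactly those inputs are excluded.
def Pre_mat2bin (dag : List (List Int)) : Prop :=
  ∀ row ∈ dag, dag.length ≤ row.length
instance (dag : List (List Int)) : Decidable (Pre_mat2bin dag) := by unfold Pre_mat2bin; infer_instance
def pvWitness_mat2bin : List (List Int) := [[1, 0], [0, 1]]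
def Spec_mat2bin (dag : List (List Int)) (out : String) : Prop := out = mat2bin_alt dag
instance (dag : List (List Int)) (out : String) : Decidable (Spec_mat2bin dag out) := by unfold Spec_mat2bin; infer_instance

-- ===== CLAIM (what is proved, stated in full; the proofs are below) =====
def Claim_equal_mat2bin : Prop := ∀ (dag : List (List Int)), Dom_mat2bin dag → Pre_mat2bin dag → Spec_mat2bin dag (mat2bin dag)

-- ===== LEMMAS AND PROOFS =====

def pvBitChar (v : Int) : Char := if v ≠ 0 then '1' else '0'

def pvStep (acc : List Char × Bool) (v : Int) : List Char × Bool :=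
  if v ≠ 0 then (acc.1 ++ ['1'], true)
  else if acc.2 then (acc.1 ++ ['0'], acc.2) else acc

def pvStepI (acc : Int) (v : Int) : Int := acc * 2 + (if v ≠ 0 then 1 else 0)

def pvStepB (x : Nat) (b : Bool) : Nat := x * 2 + (if b then 1 else 0)

def pvBChar (b : Bool) : Char := if b then '1' else '0'

-- the row-major value list both ports traverse
def pvVals (dag : List (List Int)) : List Int :=
  dag.flatMap (fun row => row.take dag.length)

lemma pvLoop_true (vs : List Int) (acc : List Char) :
    vs.foldl pvStep (acc, true) = (acc ++ vs.map pvBitChar, true) := by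
  induction vs generalizing acc with
  | nil => simp
  | cons v vs ih =>
    by_cases h : v ≠ 0 <;> simp [pvStep, pvBitChar, h, ih]

lemma pvLoop_false (vs : List Int) (acc : List Char) :
    vs.foldl pvStep (acc, false) =
      (acc ++ (vs.map pvBitChar).dropWhile (· == '0'), vs.any (· ≠ 0)) := by
  induction vs generalizing acc with
  | nil => simp
  | cons v vs ih =>
    by_cases h : v ≠ 0
    · simp [pvStep, pvBitChar, h, pvLoop_true]
    · simp only [ne_eq, not_not] at h
      simp [pvStep, pvBitChar, h, ih]

lemma pvGetD_take (row : List Int) (n : Nat) (j : Int) (h : n ≤ row.length)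
    (h0 : 0 ≤ j) (h1 : j < (n : Int)) :
    PySem.List.pyGetD (row.take n) j 0 = PySem.List.pyGetD row j 0 := by
  have hlen : (row.take n).length = n := by simp [Nat.min_eq_left h]
  rw [PySem.List.pyGetD_eq_getElem (row.take n) 0 h0 (by rw [hlen]; exact_mod_cast h1),
      PySem.List.pyGetD_eq_getElem row 0 h0 (by omega)]
  exact List.getElem_take

lemma pvInner_eq {α : Type} (row : List Int) (n : Nat) (h : n ≤ row.length)
    (step : α → Int → α) (acc : α) :
    (PySem.List.pyRange 0 (n : Int) 1).foldl
        (fun a j => step a (PySem.List.pyGetD row j 0)) acc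
      = (row.take n).foldl step acc := by
  have hlen : ((row.take n).length : Int) = (n : Int) := by simp [Nat.min_eq_left h]
  rw [← PySem.List.foldl_pyRange_zero_pyGetD' (row.take n) 0 step acc, hlen]
  apply PySem.List.foldl_congr_mem
  intro a j hj
  rw [PySem.List.mem_pyRange_one] at hj
  rw [pvGetD_take row n j h hj.1 hj.2]

lemma pvOuter_eq {α : Type} (dag : List (List Int)) (h : Pre_mat2bin dag)
    (step : α → Int → α) (acc : α) :
    (PySem.List.pyRange 0 (dag.length : Int) 1).foldl (fun a i =>
        (PySem.List.pyRange 0 (dag.length : Int) 1).foldl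
          (fun a j => step a (PySem.List.pyGetD (PySem.List.pyGetD dag i []) j 0)) a) acc
      = (pvVals dag).foldl step acc := by
  rw [PySem.List.foldl_pyRange_zero_pyGetD' dag []
    (fun a row => (PySem.List.pyRange 0 (dag.length : Int) 1).foldl
      (fun a j => step a (PySem.List.pyGetD row j 0)) a) acc]
  rw [show (pvVals dag) = (dag.map (fun row => row.take dag.length)).flatten by
    simp [pvVals, List.flatMap_def]]
  rw [List.foldl_flatten, List.foldl_map]
  apply PySem.List.foldl_congr_mem
  intro a row hrow
  exact pvInner_eq row dag.length (h row hrow) step a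

lemma mat2bin_eq_loop (dag : List (List Int)) (h : Pre_mat2bin dag) :
    mat2bin dag =
      (if (pvVals dag).any (· ≠ 0) then
        String.ofList (['0','b'] ++ ((pvVals dag).map pvBitChar).dropWhile (· == '0'))
      else "0b0") := by
  simp only [mat2bin]
  rw [show (fun (acc : List Char × Bool) (i : Int) =>
      (PySem.List.pyRange 0 (dag.length : Int) 1).foldl (fun acc j =>
        if PySem.List.pyGetD (PySem.List.pyGetD dag i []) j 0 ≠ 0 then
          (acc.1 ++ ['1'], true)
        else if acc.2 then (acc.1 ++ ['0'], acc.2) else acc) acc)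
    = (fun (a : List Char × Bool) (i : Int) =>
      (PySem.List.pyRange 0 (dag.length : Int) 1).foldl
        (fun a j => pvStep a (PySem.List.pyGetD (PySem.List.pyGetD dag i []) j 0)) a) from rfl]
  rw [pvOuter_eq dag h pvStep (['0','b'], false), pvLoop_false]

lemma mat2bin_alt_eq_loop (dag : List (List Int)) (h : Pre_mat2bin dag) :
    mat2bin_alt dag = pvPyBin ((pvVals dag).foldl pvStepI 0) := by
  simp only [mat2bin_alt]
  rw [show (fun (acc : Int) (row : Int) =>
      (PySem.List.pyRange 0 (dag.length : Int) 1).foldl (fun acc col =>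
        acc * 2 + (if PySem.List.pyGetD (PySem.List.pyGetD dag row []) col 0 ≠ 0 then 1 else 0)) acc)
    = (fun (a : Int) (row : Int) =>
      (PySem.List.pyRange 0 (dag.length : Int) 1).foldl
        (fun a j => pvStepI a (PySem.List.pyGetD (PySem.List.pyGetD dag row []) j 0)) a) from rfl]
  rw [pvOuter_eq dag h pvStepI 0]

-- the Int accumulation equals the Nat accumulation over the Bool bit list
lemma pvFoldI_eq_foldB (vs : List Int) (a : Nat) :
    vs.foldl pvStepI (a : Int)
      = (((vs.map (fun v => decide (v ≠ 0))).foldl pvStepB a : Nat) : Int) := by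
  induction vs generalizing a with
  | nil => simp
  | cons v vs ih =>
    by_cases h : v ≠ 0
    · simpa [pvStepI, pvStepB, h] using ih (a * 2 + 1)
    · simp only [ne_eq, not_not] at h
      simpa [pvStepI, pvStepB, h] using ih (a * 2)

lemma pvBinChars_stepB (m : Nat) (b : Bool) (h : 0 < m) :
    pvBinChars (pvStepB m b) = pvBinChars m ++ [pvBChar b] := by
  conv_lhs => rw [pvBinChars]
  cases b with
  | false =>
    rw [show pvStepB m false = m * 2 from by simp [pvStepB]]
    have h2 : m * 2 / 2 = m := by omega
    have h3 : m * 2 % 2 = 0 := by omega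
    simp [Nat.mul_ne_zero (by omega : m ≠ 0) two_ne_zero, h2, h3, pvBChar]
  | true =>
    rw [show pvStepB m true = m * 2 + 1 from by simp [pvStepB]]
    have h2 : (m * 2 + 1) / 2 = m := by omega
    have h3 : (m * 2 + 1) % 2 = 1 := by omega
    simp [h2, h3, pvBChar]

lemma pvBinChars_foldB (bs : List Bool) (m : Nat) (h : 0 < m) :
    pvBinChars (bs.foldl pvStepB m) = pvBinChars m ++ bs.map pvBChar := by
  induction bs generalizing m with
  | nil => simp
  | cons b bs ih =>
    have hpos : 0 < pvStepB m b := by simp only [pvStepB]; omega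
    simp only [List.foldl_cons, List.map_cons]
    rw [ih (pvStepB m b) hpos, pvBinChars_stepB m b h, List.append_assoc]
    rfl

lemma pvFoldB_le (bs : List Bool) (m : Nat) : m ≤ bs.foldl pvStepB m := by
  induction bs generalizing m with
  | nil => simp
  | cons b bs ih =>
    have : m ≤ pvStepB m b := by simp only [pvStepB]; omega
    exact le_trans this (ih _)

lemma pvFoldB_dropFalse (bs : List Bool) :
    bs.foldl pvStepB 0 = (bs.dropWhile (fun b => !b)).foldl pvStepB 0 := by
  induction bs with
  | nil => rfl
  | cons b bs ih =>
    cases b with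
    | false => simpa [pvStepB] using ih
    | true => rfl

lemma pvMap_bitChar (vs : List Int) :
    vs.map pvBitChar = (vs.map (fun v => decide (v ≠ 0))).map pvBChar := by
  rw [List.map_map]
  apply List.map_congr_left
  intro v _
  by_cases h : v ≠ 0 <;> simp [pvBitChar, pvBChar, h]

lemma pvDrop_map (bs : List Bool) :
    (bs.map pvBChar).dropWhile (· == '0') = (bs.dropWhile (fun b => !b)).map pvBChar := by
  rw [List.dropWhile_map,
    show ((fun x => x == '0') ∘ pvBChar) = (fun b => !b) from
      funext (fun b => by cases b <;> simp [pvBChar])]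

lemma pvDropHead_true : ∀ (bs : List Bool) (b : Bool) (rest : List Bool),
    bs.dropWhile (fun x => !x) = b :: rest → b = true := by
  intro bs
  induction bs with
  | nil => intro b rest h; simp at h
  | cons a l ih =>
    intro b rest h
    cases a with
    | false => exact ih b rest (by simpa using h)
    | true => simpa using congrArg (fun l => l.head?) h.symm

lemma pvAny_iff (vs : List Int) :
    (vs.any (· ≠ 0) = true) ↔ ((vs.map (fun v => decide (v ≠ 0))).dropWhile (fun b => !b) ≠ []) := by
  rw [Ne, List.dropWhile_eq_nil_iff]
  simp

-- ===== VERDICT (by name: the statement is the Claim_ definition above) =====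
theorem mat2bin_spec : Claim_equal_mat2bin := by
  intro dag _ hpre
  unfold Spec_mat2bin
  rw [mat2bin_eq_loop dag hpre, mat2bin_alt_eq_loop dag hpre]
  set vs := pvVals dag with hvs
  set bs := vs.map (fun v => decide (v ≠ 0)) with hbs
  have hI := pvFoldI_eq_foldB vs 0
  rw [Nat.cast_zero] at hI
  rw [hI, pvFoldB_dropFalse bs]
  by_cases hany : vs.any (· ≠ 0)
  · obtain ⟨b, rest, hdrop⟩ := List.exists_cons_of_ne_nil ((pvAny_iff vs).mp hany)
    have hb : b = true := pvDropHead_true bs b rest hdrop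
    subst hb
    rw [if_pos hany, hdrop]
    have hN : (true :: rest).foldl pvStepB 0 = rest.foldl pvStepB 1 := by
      simp [pvStepB]
    have hpos : 0 < (true :: rest).foldl pvStepB 0 := by
      rw [hN]; exact lt_of_lt_of_le one_pos (pvFoldB_le rest 1)
    have hIntPos : (0 : Int) < (((true :: rest).foldl pvStepB 0 : Nat) : Int) := by
      exact_mod_cast hpos
    rw [pvPyBin, if_neg (by omega), if_neg (by omega)]
    have htoNat : ((((true :: rest).foldl pvStepB 0 : Nat) : Int)).toNat
        = (true :: rest).foldl pvStepB 0 := Int.toNat_natCast _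
    rw [htoNat, hN, pvBinChars_foldB rest 1 one_pos]
    have h1 : pvBinChars 1 = ['1'] := by
      rw [pvBinChars]; norm_num; rw [pvBinChars]; simp
    rw [h1, pvMap_bitChar vs, ← hbs, pvDrop_map bs, hdrop]
    simp [pvBChar]
  · have hdropnil : bs.dropWhile (fun b => !b) = [] := by
      by_contra hne
      exact hany ((pvAny_iff vs).mpr hne)
    rw [if_neg hany, hdropnil]
    simp [pvPyBin]
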